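-- pv_equiv track=rewrite | github.com/JapoMomi/BLAD-SICS | ByT5_training_sequenceNormalTraffic.py | group_sequences
-- ===== SOURCE A (Python) =====
-- def group_sequences(packets, timestamps, n_packets, max_time_gap):
--     sequences = []
--     start = 0
--     while start < len(packets):
--         seq = [packets[start]]
--         current_ts = timestamps[start]
--         for j in range(start + 1, len(packets)):
--             if len(seq) >= n_packets:
--                 break
--             if timestamps[j] - current_ts > max_time_gap:
--                 break
--             seq.append(packets[j])
--             current_ts = timestamps[j]
--         # Join packets with a separator token
--         seq_text = "     ".join(seq)
--         sequences.append(seq_text)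
--         start += 1  # shift by 1 to keep overlapping sequences
--     return sequences
-- ===== SOURCE B (Python) =====
-- def group_sequences(packets, timestamps, n_packets, max_time_gap):
--     # Precompute, in one backward pass, seg_end[i] = the last index reachable
--     # from i through consecutive time gaps <= max_time_gap; then each output
--     # is a single slice capped at n_packets (always at least one packet).
--     n = len(packets)
--     seg_end = [0] * n
--     for i in range(n - 1, -1, -1):
--         if i + 1 < n and timestamps[i + 1] - timestamps[i] <= max_time_gap:
--             seg_end[i] = seg_end[i + 1]
--         else:
--             seg_end[i] = i
--     cap = max(n_packets, 1)
--     return ["     ".join(packets[start:start + min(seg_end[start] - start + 1, cap)])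
--             for start in range(n)]
-- ===== Notes on version B (the rewrite author's own statement) =====
-- stated objective: alternative
-- what changed: Replaces the per-start inner extension loop with a single backward pass that precomputes each index's segment end (last index reachable through gaps <= max_time_gap), after which every output sequence is one boundary lookup plus a capped slice.
import Mathlib
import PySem

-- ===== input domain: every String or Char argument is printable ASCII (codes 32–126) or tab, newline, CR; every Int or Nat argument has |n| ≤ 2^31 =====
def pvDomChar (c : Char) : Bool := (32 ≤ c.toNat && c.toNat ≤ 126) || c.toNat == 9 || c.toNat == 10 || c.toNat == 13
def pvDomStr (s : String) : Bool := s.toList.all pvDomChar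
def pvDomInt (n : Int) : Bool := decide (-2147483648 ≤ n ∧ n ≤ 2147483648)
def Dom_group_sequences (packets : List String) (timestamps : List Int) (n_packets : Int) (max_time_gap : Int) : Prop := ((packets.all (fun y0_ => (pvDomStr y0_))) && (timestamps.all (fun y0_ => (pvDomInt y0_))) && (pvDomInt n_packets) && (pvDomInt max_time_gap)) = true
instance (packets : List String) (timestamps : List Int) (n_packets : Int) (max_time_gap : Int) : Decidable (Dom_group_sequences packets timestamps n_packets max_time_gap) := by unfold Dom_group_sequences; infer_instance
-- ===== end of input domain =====

-- B replaces A's per-start inner extension loop by a precomputed segment-boundary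
-- table (one backward pass) plus a capped slice per start; alternative decomposition, same results.


-- ===== PORT A =====
-- inner 'for j in range(start+1, len(packets))' loop with its two breaks;
-- list indexing is .getD (exact under Pre_: every index accessed is in range)
def grpAInner (packets : List String) (timestamps : List Int) (n_packets : Int) (max_time_gap : Int) (j : Nat) (seq : List String) (current_ts : Int) : List String :=
  if j < packets.length then
    if (seq.length : Int) ≥ n_packets then seq
    else if timestamps.getD j 0 - current_ts > max_time_gap then seq
    else grpAInner packets timestamps n_packets max_time_gap (j + 1) (seq ++ [packets.getD j ""]) (timestamps.getD j 0)
  else seq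
termination_by packets.length - j

-- outer 'while start < len(packets)' loop, appending one joined sequence per start
def grpAOuter (packets : List String) (timestamps : List Int) (n_packets : Int) (max_time_gap : Int) (start : Nat) : List String :=
  if start < packets.length then
    PySem.Str.join "     " (grpAInner packets timestamps n_packets max_time_gap (start + 1) [packets.getD start ""] (timestamps.getD start 0))
      :: grpAOuter packets timestamps n_packets max_time_gap (start + 1)
  else []
termination_by packets.length - start

def group_sequences (packets : List String) (timestamps : List Int) (n_packets : Int) (max_time_gap : Int) : List String :=
  grpAOuter packets timestamps n_packets max_time_gap 0

-- ===== PORT B =====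
-- backward fill of seg_end: returns [seg_end[i], ..., seg_end[n-1]]; consing to the
-- front of the already-filled suffix is the backward array fill of Source B
def segEndList (timestamps : List Int) (max_time_gap : Int) (n : Nat) (i : Nat) : List Nat :=
  if i < n then
    let rest := segEndList timestamps max_time_gap n (i + 1)
    (if i + 1 < n ∧ timestamps.getD (i + 1) 0 - timestamps.getD i 0 ≤ max_time_gap then rest.getD 0 i else i) :: rest
  else []
termination_by n - i

-- the comprehension; packets[start:start+cnt] with 0 ≤ cnt is drop/take (exact here)
def group_sequences_alt (packets : List String) (timestamps : List Int) (n_packets : Int) (max_time_gap : Int) : List String :=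
  let n := packets.length
  let se := segEndList timestamps max_time_gap n 0
  let cap := max n_packets 1
  (List.range n).map (fun start =>
    let cnt : Int := min ((se.getD start 0 : Int) - start + 1) cap
    PySem.Str.join "     " ((packets.drop start).take cnt.toNat))

-- ===== PRECONDITION & SPEC =====
-- Pre_ excludes exactly the inputs where Python A raises IndexError:
-- timestamps shorter than packets (timestamps[start] is read for every start < len(packets)).
def Pre_group_sequences (packets : List String) (timestamps : List Int) (n_packets : Int) (max_time_gap : Int) : Prop :=
  packets.length ≤ timestamps.length
instance (packets : List String) (timestamps : List Int) (n_packets : Int) (max_time_gap : Int) : Decidable (Pre_group_sequences packets timestamps n_packets max_time_gap) := by unfold Pre_group_sequences; infer_instance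

def pvWitness_group_sequences : List String × List Int × Int × Int := (["ab", "cd", "ef"], [0, 1, 10], 2, 5)

def Spec_group_sequences (packets : List String) (timestamps : List Int) (n_packets : Int) (max_time_gap : Int) (out : List String) : Prop := out = group_sequences_alt packets timestamps n_packets max_time_gap
instance (packets : List String) (timestamps : List Int) (n_packets : Int) (max_time_gap : Int) (out : List String) : Decidable (Spec_group_sequences packets timestamps n_packets max_time_gap out) := by unfold Spec_group_sequences; infer_instance

-- ===== CLAIM (what is proved, stated in full; the proofs are below) =====
def Claim_equal_group_sequences : Prop := ∀ (packets : List String) (timestamps : List Int) (n_packets : Int) (max_time_gap : Int), Dom_group_sequences packets timestamps n_packets max_time_gap → Pre_group_sequences packets timestamps n_packets max_time_gap → Spec_group_sequences packets timestamps n_packets max_time_gap (group_sequences packets timestamps n_packets max_time_gap)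

-- ===== LEMMAS AND PROOFS =====

-- abstract segment end: largest reachable index from i through gaps ≤ g, below n
def eFun (ts : List Int) (g : Int) (n : Nat) (i : Nat) : Nat :=
  if i + 1 < n ∧ ts.getD (i + 1) 0 - ts.getD i 0 ≤ g then eFun ts g n (i + 1) else i
termination_by n - i

lemma eFun_ge (ts : List Int) (g : Int) (n i : Nat) : i ≤ eFun ts g n i := by
  rw [eFun]
  split
  · exact le_trans (by omega) (eFun_ge ts g n (i + 1))
  · exact le_refl i
termination_by n - i
decreasing_by omega

lemma segEndList_getD0 (ts : List Int) (g : Int) (n i : Nat) (d : Nat) (h : i < n) :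
    (segEndList ts g n i).getD 0 d = eFun ts g n i := by
  rw [segEndList, eFun]
  simp only [if_pos h, List.getD_cons_zero]
  split
  · next hc => exact segEndList_getD0 ts g n (i + 1) i hc.1
  · rfl
termination_by n - i
decreasing_by omega

lemma segEndList_getD (ts : List Int) (g : Int) (n : Nat) :
    ∀ (k i : Nat), i + k < n → (segEndList ts g n i).getD k 0 = eFun ts g n (i + k) := by
  intro k
  induction k with
  | zero =>
    intro i h
    simp only [Nat.add_zero] at h ⊢
    exact segEndList_getD0 ts g n i 0 h
  | succ k' ih =>
    intro i h
    rw [segEndList]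
    simp only [if_pos (show i < n by omega), List.getD_cons_succ]
    rw [ih (i + 1) (by omega)]
    congr 1
    omega

-- characterisation of A's inner loop: starting at j with accumulated seq and
-- current_ts = ts[j-1], it appends the capped continuation of the segment of j-1
lemma innerA_eq (packets : List String) (ts : List Int) (np g : Int) (j : Nat) (seq : List String) (hj : 1 ≤ j) :
    grpAInner packets ts np g j seq (ts.getD (j - 1) 0)
      = seq ++ (packets.drop j).take (min (eFun ts g packets.length (j - 1) + 1 - j) (np - (seq.length : Int)).toNat) := by
  rw [grpAInner]
  by_cases hjn : j < packets.length
  · simp only [if_pos hjn]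
    by_cases hcap : (seq.length : Int) ≥ np
    · have : (np - (seq.length : Int)).toNat = 0 := by omega
      simp [hcap, this]
    · simp only [if_neg hcap]
      by_cases hgap : ts.getD j 0 - ts.getD (j - 1) 0 > g
      · have he : eFun ts g packets.length (j - 1) = j - 1 := by
          rw [eFun]
          have : ¬ ((j - 1) + 1 < packets.length ∧ ts.getD ((j - 1) + 1) 0 - ts.getD (j - 1) 0 ≤ g) := by
            intro ⟨_, h2⟩
            have : (j - 1) + 1 = j := by omega
            rw [this] at h2
            omega
          rw [if_neg this]
        rw [if_pos hgap, he]
        simp [show j - 1 + 1 - j = 0 by omega]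
      · rw [if_neg hgap]
        have he : eFun ts g packets.length (j - 1) = eFun ts g packets.length j := by
          rw [eFun]
          have hc : (j - 1) + 1 < packets.length ∧ ts.getD ((j - 1) + 1) 0 - ts.getD (j - 1) 0 ≤ g := by
            refine ⟨by omega, ?_⟩
            rw [show (j - 1) + 1 = j by omega]
            omega
          rw [if_pos hc, show (j - 1) + 1 = j by omega]
        have ih := innerA_eq packets ts np g (j + 1) (seq ++ [packets.getD j ""]) (by omega)
        rw [show (j + 1) - 1 = j by omega] at ih
        rw [ih, he]
        have hdrop : packets.drop j = packets.getD j "" :: packets.drop (j + 1) := by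
          rw [List.getD_eq_getElem _ _ hjn]
          exact List.drop_eq_getElem_cons hjn
        rw [hdrop]
        have hge := eFun_ge ts g packets.length j
        have hb : 1 ≤ (np - (seq.length : Int)).toNat := by omega
        have hlen : ((seq ++ [packets.getD j ""]).length : Int) = (seq.length : Int) + 1 := by
          simp
        rw [hlen]
        have hmin : min (eFun ts g packets.length j + 1 - j) (np - (seq.length : Int)).toNat
            = min (eFun ts g packets.length j + 1 - (j + 1)) (np - ((seq.length : Int) + 1)).toNat + 1 := by
          omega
        rw [hmin, List.take_succ_cons]
        simp
  · have : packets.drop j = [] := List.drop_eq_nil_of_le (by omega)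
    simp [hjn, this]
termination_by packets.length - j
decreasing_by omega

-- the per-start values of the two sides coincide
lemma start_eq (packets : List String) (ts : List Int) (np g : Int) (s : Nat) (hs : s < packets.length) :
    PySem.Str.join "     " (grpAInner packets ts np g (s + 1) [packets.getD s ""] (ts.getD s 0))
      = PySem.Str.join "     " ((packets.drop s).take (min ((((segEndList ts g packets.length 0).getD s 0 : Nat) : Int) - s + 1) (max np 1)).toNat) := by
  have hseg := segEndList_getD ts g packets.length s 0 (by omega)
  rw [show (0 + s) = s from by omega] at hseg
  rw [hseg]
  have hinner := innerA_eq packets ts np g (s + 1) [packets.getD s ""] (by omega)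
  rw [show (s + 1) - 1 = s by omega] at hinner
  rw [hinner]
  have hge := eFun_ge ts g packets.length s
  set e := eFun ts g packets.length s with he
  have hdrop : packets.drop s = packets.getD s "" :: packets.drop (s + 1) := by
    rw [List.getD_eq_getElem _ _ hs]
    exact List.drop_eq_getElem_cons hs
  rw [hdrop]
  have hcnt : (min (((e : Nat) : Int) - s + 1) (max np 1)).toNat
      = min (e + 1 - (s + 1)) (np - (([packets.getD s ""] : List String).length : Int)).toNat + 1 := by
    simp only [List.length_singleton]
    omega
  rw [hcnt, List.take_succ_cons]
  simp

-- the outer while-loop is the tail of B's map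
lemma outer_eq (packets : List String) (ts : List Int) (np g : Int) (s : Nat) :
    grpAOuter packets ts np g s
      = (List.range' s (packets.length - s)).map (fun start =>
          PySem.Str.join "     " ((packets.drop start).take
            (min ((((segEndList ts g packets.length 0).getD start 0 : Nat) : Int) - start + 1) (max np 1)).toNat)) := by
  rw [grpAOuter]
  by_cases hs : s < packets.length
  · have hr : packets.length - s = (packets.length - (s + 1)) + 1 := by omega
    rw [if_pos hs, hr, List.range'_succ, List.map_cons, start_eq packets ts np g s hs,
        outer_eq packets ts np g (s + 1)]
  · simp [hs, show packets.length - s = 0 by omega]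
termination_by packets.length - s
decreasing_by omega

-- ===== VERDICT (by name: the statement is the Claim_ definition above) =====
theorem group_sequences_spec : Claim_equal_group_sequences := by
  intro packets ts np g _ _
  unfold Spec_group_sequences group_sequences group_sequences_alt
  rw [outer_eq]
  simp [List.range_eq_range']
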